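-- pv_equiv track=rewrite | github.com/hyomin777/Algorithm | LeetCode/0273-integer-to-english-words/0273-integer-to-english-words.py | group_num_by_three_digits
-- ===== SOURCE A (Python) =====
-- from typing import List
--
-- def group_num_by_three_digits(num: int) -> List[str]:
--     groupped_nums = []
--     num_str = str(num)
--
--     for i in range(len(num_str), 0, -3):
--         start = max(i - 3, 0)
--         groupped_num = num_str[start:i]
--         if groupped_num:
--             groupped_nums.append(groupped_num)
--
--     return groupped_nums
-- ===== SOURCE B (Python) =====
-- def group_num_by_three_digits(num: int):
--     def chunks(s):
--         if len(s) <= 3: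
--             return [s]
--         return [s[-3:]] + chunks(s[:-3])
--     return chunks(str(num))
-- ===== Notes on version B (the rewrite author's own statement) =====
-- stated objective: simpler
-- what changed: Replaced A's backward index loop with slice-bound arithmetic and a conditional append by a short recursion on the string that peels the trailing three-character chunk off each step.
import Mathlib
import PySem

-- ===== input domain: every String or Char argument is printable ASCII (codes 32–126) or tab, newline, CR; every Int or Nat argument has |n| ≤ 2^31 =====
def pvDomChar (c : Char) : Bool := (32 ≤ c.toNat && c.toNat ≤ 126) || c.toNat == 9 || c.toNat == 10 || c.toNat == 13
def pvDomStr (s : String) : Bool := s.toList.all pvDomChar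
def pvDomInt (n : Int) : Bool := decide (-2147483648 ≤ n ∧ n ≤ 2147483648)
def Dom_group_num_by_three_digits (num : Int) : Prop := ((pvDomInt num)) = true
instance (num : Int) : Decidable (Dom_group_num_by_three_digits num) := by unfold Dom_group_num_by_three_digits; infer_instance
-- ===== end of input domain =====

-- B replaces A's backward index loop over range(len,0,-3) by a recursion that peels the
-- last three characters of str(num) each step; same output, a simpler decomposition.

-- ===== PORT A =====
def group_num_by_three_digits (num : Int) : List String :=
  let numStr : List Char := PySem.Int.toChars num
  (PySem.List.pyRange (numStr.length : Int) 0 (-3)).foldl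
    (fun acc i =>
      let start := max (i - 3) 0
      let groupped := PySem.List.slice numStr (some start) (some i)
      if groupped ≠ [] then acc ++ [String.ofList groupped] else acc)
    []

-- ===== PORT B =====
def pvChunks (s : List Char) : List (List Char) :=
  if s.length ≤ 3 then [s]
  else s.drop (s.length - 3) :: pvChunks (s.take (s.length - 3))
termination_by s.length
decreasing_by simp; omega

def group_num_by_three_digits_alt (num : Int) : List String :=
  (pvChunks (PySem.Int.toChars num)).map String.ofList

-- ===== PRECONDITION & SPEC =====
def Spec_group_num_by_three_digits (num : Int) (out : List String) : Prop := out = group_num_by_three_digits_alt num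
instance (num : Int) (out : List String) : Decidable (Spec_group_num_by_three_digits num out) := by unfold Spec_group_num_by_three_digits; infer_instance

-- ===== CLAIM (what is proved, stated in full; the proofs are below) =====
def Claim_equal_group_num_by_three_digits : Prop := ∀ (num : Int), Dom_group_num_by_three_digits num → Spec_group_num_by_three_digits num (group_num_by_three_digits num)

-- ===== LEMMAS AND PROOFS =====

theorem pyRange_neg3_nil (a : Int) (h : a ≤ 0) : PySem.List.pyRange a 0 (-3) = [] := by
  simp only [PySem.List.pyRange]
  norm_num
  intro h2; omega

theorem pyRange_neg3_cons (a : Int) (h : 0 < a) :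
    PySem.List.pyRange a 0 (-3) = a :: PySem.List.pyRange (a-3) 0 (-3) := by
  simp only [PySem.List.pyRange]
  norm_num
  rw [if_pos h]
  by_cases h3 : 3 < a
  · rw [if_pos h3]
    have hc : ((a + 3 - 1)/3).toNat = ((a - 1)/3).toNat + 1 := by omega
    rw [hc, List.range_succ_eq_map]
    simp only [List.map_cons, List.map_map]
    congr 1
    · norm_num
    · apply List.map_congr_left; intro k _
      simp only [Function.comp_apply]
      push_cast; ring
  · rw [if_neg h3]
    have hc : ((a + 3 - 1)/3).toNat = 1 := by omega
    rw [hc]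
    simp

theorem mem_pyRange_neg3 (a x : Int) (hx : x ∈ PySem.List.pyRange a 0 (-3)) : 0 < x ∧ x ≤ a := by
  simp only [PySem.List.pyRange] at hx
  norm_num at hx
  split_ifs at hx with h1
  · obtain ⟨k, hk, he⟩ := hx
    omega
  · simp at hx

-- A's loop body, named for the proofs
def pvStep (s : List Char) (acc : List String) (i : Int) : List String :=
  if PySem.List.slice s (some (max (i - 3) 0)) (some i) ≠ [] then
    acc ++ [String.ofList (PySem.List.slice s (some (max (i - 3) 0)) (some i))]
  else acc

theorem pvStep_out (s : List Char) (l : List Int) :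
    ∀ acc, l.foldl (pvStep s) acc = acc ++ l.foldl (pvStep s) [] := by
  induction l with
  | nil => simp
  | cons x xs ih =>
    intro acc
    rw [List.foldl_cons, List.foldl_cons, ih (pvStep s acc x), ih (pvStep s [] x)]
    simp only [pvStep]
    split_ifs <;> simp

theorem pv_toDigitsCore_len (b : Nat) : ∀ (f n : Nat) (l : List Char),
    l.length ≤ (Nat.toDigitsCore b f n l).length := by
  intro f
  induction f with
  | zero => intro n l; simp [Nat.toDigitsCore]
  | succ f ih =>
    intro n l
    simp only [Nat.toDigitsCore]
    split
    · simp
    · calc l.length ≤ ((n % b).digitChar :: l).length := by simp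
        _ ≤ _ := ih _ _

theorem pv_toDigits_ne_nil (b n : Nat) : Nat.toDigits b n ≠ [] := by
  simp only [Nat.toDigits, Nat.toDigitsCore]
  split
  · simp
  · have hlen := pv_toDigitsCore_len b n (n / b) [(n % b).digitChar]
    intro h; rw [h] at hlen; simp at hlen

theorem pv_toChars_ne_nil (n : Int) : PySem.Int.toChars n ≠ [] := by
  simp only [PySem.Int.toChars]
  split
  · simp
  · exact pv_toDigits_ne_nil 10 n.toNat

theorem pv_main : ∀ (n : Nat), ∀ s : List Char, s.length = n → s ≠ [] →
    (PySem.List.pyRange (s.length : Int) 0 (-3)).foldl (pvStep s) []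
      = (pvChunks s).map String.ofList := by
  intro n
  induction n using Nat.strong_induction_on with
  | _ n ih =>
    intro s hn hne
    have hpos : 0 < s.length := List.length_pos_iff.mpr hne
    by_cases h3 : s.length ≤ 3
    · -- single chunk
      rw [pyRange_neg3_cons _ (by exact_mod_cast hpos),
          pyRange_neg3_nil _ (by omega)]
      simp only [List.foldl_cons, List.foldl_nil, pvStep]
      have hmax : max ((s.length : Int) - 3) 0 = 0 := by omega
      rw [hmax]
      rw [PySem.List.slice_zero_start, PySem.List.slice_to _ (by positivity)]
      simp only [Int.toNat_natCast, List.take_length]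
      rw [if_pos hne]
      rw [pvChunks, if_pos h3]
      simp
    · -- peel the top chunk of 3, recurse on the rest
      push Not at h3
      rw [pyRange_neg3_cons _ (by exact_mod_cast hpos)]
      rw [List.foldl_cons, pvStep_out]
      -- head chunk
      have hhead : pvStep s [] (s.length : Int)
          = [String.ofList (s.drop (s.length - 3))] := by
        simp only [pvStep]
        have hmax : max ((s.length : Int) - 3) 0 = (s.length : Int) - 3 := by omega
        rw [hmax]
        rw [PySem.List.slice_toNat _ (by omega) (by positivity)]
        have h1 : ((s.length : Int) - 3).toNat = s.length - 3 := by omega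
        have h2 : (s.length : Int).toNat = s.length := by omega
        rw [h1, h2]
        rw [List.take_of_length_le (by simp only [List.length_drop]; omega)]
        rw [if_pos (by rw [Ne, List.drop_eq_nil_iff]; omega)]
        simp
      rw [hhead]
      -- tail: same folds over the truncated string
      have hcast : (s.length : Int) - 3 = ((s.length - 3 : Nat) : Int) := by omega
      set s' : List Char := s.take (s.length - 3) with hs'
      have hlen' : s'.length = s.length - 3 := by simp [hs']
      have hcong : ∀ (acc : List String) (i : Int),
          i ∈ PySem.List.pyRange ((s.length : Int) - 3) 0 (-3) →
          pvStep s acc i = pvStep s' acc i := by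
        intro acc i hi
        obtain ⟨hi0, hile⟩ := mem_pyRange_neg3 _ _ hi
        have hmaxnn : 0 ≤ max (i - 3) 0 := le_max_right _ _
        simp only [pvStep]
        rw [PySem.List.slice_toNat _ hmaxnn (by omega),
            PySem.List.slice_toNat _ hmaxnn (by omega)]
        have hdrop : s'.drop (max (i - 3) 0).toNat
            = (s.drop (max (i - 3) 0).toNat).take (s.length - 3 - (max (i - 3) 0).toNat) := by
          rw [hs', List.drop_take]
        rw [hdrop, List.take_take]
        have : min (i.toNat - (max (i - 3) 0).toNat) (s.length - 3 - (max (i - 3) 0).toNat)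
            = i.toNat - (max (i - 3) 0).toNat := by omega
        rw [this]
      rw [PySem.List.foldl_congr_mem _ _ _ _ hcong]
      have hne' : s' ≠ [] := by
        intro hc
        rw [hc] at hlen'
        simp at hlen'
        omega
      have htail := ih (s.length - 3) (by omega) s' hlen' hne'
      rw [hlen'] at htail
      rw [hcast, htail]
      have hch : pvChunks s = s.drop (s.length - 3) :: pvChunks s' := by
        rw [pvChunks, if_neg (by omega)]
      rw [hch]
      simp

-- ===== VERDICT (by name: the statement is the Claim_ definition above) =====
theorem group_num_by_three_digits_spec : Claim_equal_group_num_by_three_digits := by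
  intro num _
  unfold Spec_group_num_by_three_digits group_num_by_three_digits group_num_by_three_digits_alt
  exact pv_main (PySem.Int.toChars num).length _ rfl (pv_toChars_ne_nil num)
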